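-- pv_equiv track=rewrite | github.com/D3r3k23/LastFmTimeline | functions.py | get_rank_data
-- ===== SOURCE A (Python) =====
-- from collections import namedtuple
--
-- def get_rank_data(charts, data):
--     RankItem = namedtuple("RankItem", ["scrobbles", "name"])
--
--     for chart in charts:
--         ranking = [ RankItem(scrobbles=itemData[chart], name=itemName) for itemName, itemData in data.items() ]
--         ranking.sort(key=lambda x: x.name)
--         ranking.sort(key=lambda x: x.scrobbles, reverse=True)
--         for index, item in enumerate(ranking):
--             data[chart][item.name] = index + 1
--
--     return data
-- ===== SOURCE B (Python) =====
-- def get_rank_data(charts, data):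
--     # Recursive over charts; per chart: dominator-count ranks, counting-sort
--     # placement into slots, then one batch of writes into data[chart].
--     # Mutates data in place like the original.
--     if not charts:
--         return data
--     chart, rest = charts[0], charts[1:]
--     items = [(name, inner[chart]) for name, inner in data.items()]
--     if items:
--         slots = [None] * len(items)
--         for name, s in items:
--             k = sum(1 for n2, s2 in items if s2 > s or (s2 == s and n2 < name))
--             slots[k] = name
--         inner = data[chart]
--         for name, r in zip(slots, range(1, len(slots) + 1)):
--             inner[name] = r
--     return get_rank_data(rest, data)
-- ===== Notes on version B (the rewrite author's own statement) =====
-- stated objective: alternative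
-- what changed: Replaces the two stable sorts plus enumerate-and-write-per-item by a recursion over charts that computes each item's rank as a dominator count (1 + number of items with more scrobbles, or equal scrobbles and a smaller name), places names into rank slots by counting sort, and applies all writes to data[chart] in one batch; distinct dict keys make the ranks a permutation, so the result is identical.
import Mathlib
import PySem

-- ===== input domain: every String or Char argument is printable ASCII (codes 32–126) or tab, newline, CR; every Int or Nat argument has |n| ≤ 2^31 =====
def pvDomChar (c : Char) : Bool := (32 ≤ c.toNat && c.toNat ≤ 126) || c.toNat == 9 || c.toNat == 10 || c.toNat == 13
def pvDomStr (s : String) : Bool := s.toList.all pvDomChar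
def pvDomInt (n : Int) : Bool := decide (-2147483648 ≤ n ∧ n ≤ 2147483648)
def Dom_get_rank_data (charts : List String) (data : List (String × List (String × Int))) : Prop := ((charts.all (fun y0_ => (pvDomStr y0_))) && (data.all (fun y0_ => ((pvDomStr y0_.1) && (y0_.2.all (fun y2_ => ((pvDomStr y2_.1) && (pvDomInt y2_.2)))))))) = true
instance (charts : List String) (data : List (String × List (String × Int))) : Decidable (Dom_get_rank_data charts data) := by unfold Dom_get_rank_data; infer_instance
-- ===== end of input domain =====

-- B recurses over the charts and, per chart, computes each item's rank as a dominator count,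
-- places the names into rank slots by counting sort, and applies all writes to data[chart] in one
-- batch — instead of A's two stable sorts and per-item write; both Pythons mutate `data` in place
-- in the same way, and the equivalence proved here is about the returned value.

-- ===== PORT A =====
-- hand-ported dict primitives for A (Python dict: first-match lookup, in-place overwrite)
-- inner[k]; an absent key is a KeyError, excluded by Pre_ (the 0 default is unreachable there)
def alGet (d : List (String × Int)) (k : String) : Int :=
  match d with
  | [] => 0
  | (k', v') :: t => if k' = k then v' else alGet t k

-- inner[k] = v : overwrite in place, else append (exact Python dict assignment)
def alSet (d : List (String × Int)) (k : String) (v : Int) : List (String × Int) :=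
  match d with
  | [] => [(k, v)]
  | (k', v') :: t => if k' = k then (k, v) :: t else (k', v') :: alSet t k v

-- data[c][n] = v; an absent chart key c is a KeyError, excluded by Pre_ (no-op here)
def dSet (data : List (String × List (String × Int))) (c n : String) (v : Int) :
    List (String × List (String × Int)) :=
  match data with
  | [] => []
  | (m, d) :: t => if m = c then (m, alSet d n v) :: t else (m, d) :: dSet t c n v

def get_rank_data (charts : List String) (data : List (String × List (String × Int))) : List (String × List (String × Int)) :=
  charts.foldl (fun data chart =>
    let ranking := data.map (fun p => (alGet p.2 chart, p.1))          -- RankItem(scrobbles, name)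
    let ranking := PySem.List.sorted ranking (fun x => x.2) false      -- ranking.sort(key=.name)
    let ranking := PySem.List.sorted ranking (fun x => x.1) true       -- ranking.sort(key=.scrobbles, reverse=True)
    (PySem.List.enumerate ranking 0).foldl
      (fun d ix => dSet d chart ix.2.2 (ix.1 + 1)) data) data

-- ===== PORT B =====
-- B's dict primitives, in B's own style
-- inner[k] via first match; an absent key is a KeyError, excluded by Pre_ (0 unreachable there)
def bGet (d : List (String × Int)) (k : String) : Int :=
  (((d.find? (fun p => p.1 = k)).map Prod.snd).getD 0)

-- inner[k] = v : overwrite at the first matching position, else append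
def bPut (d : List (String × Int)) (k : String) (v : Int) : List (String × Int) :=
  match d.findIdx? (fun p => p.1 = k) with
  | some i => d.set i (k, v)
  | none => d ++ [(k, v)]

-- `inner = data[c]` + in-place mutation of inner by f (first matching entry; KeyError excluded by Pre_)
def bWithChart (data : List (String × List (String × Int))) (c : String)
    (f : List (String × Int) → List (String × Int)) : List (String × List (String × Int)) :=
  match data with
  | [] => []
  | e :: t => if e.1 = c then (e.1, f e.2) :: t else e :: bWithChart t c f

def get_rank_data_alt : List String → List (String × List (String × Int)) → List (String × List (String × Int))
  | [], data => data
  | chart :: rest, data =>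
    let items := data.map (fun p => (p.1, bGet p.2 chart))
    if items = [] then get_rank_data_alt rest data else
      -- slots = [None]*len(items); slots[k] = name ("" stands for None; every slot is overwritten)
      let slots := items.foldl (fun sl it =>
          sl.set (items.countP (fun q => decide (q.2 > it.2) || (decide (q.2 = it.2) && decide (q.1 < it.1)))) it.1)
        (List.replicate items.length "")
      get_rank_data_alt rest
        (bWithChart data chart (fun inner =>
          (slots.zip (PySem.List.pyRange 1 (PySem.List.len slots + 1) 1)).foldl
            (fun inn p => bPut inn p.1 p.2) inner))

-- ===== PRECONDITION & SPEC =====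
-- Pre_ = the inputs on which A returns without a KeyError: either data is empty (nothing is read
-- or written), or round i can read chart charts[i] from every entry whose inner dict was not
-- already rewritten by an earlier round (an entry whose key occurs among the earlier charts
-- already holds every top-level name), and charts[i] must be a top-level key.  Nodup of the
-- top-level keys is free: a Python dict has no duplicate keys.
def Pre_get_rank_data (charts : List String) (data : List (String × List (String × Int))) : Prop :=
  (data.map Prod.fst).Nodup ∧
  (data = [] ∨
    ∀ i, (hi : i < charts.length) → charts[i] ∈ data.map Prod.fst ∧
      ∀ e ∈ data, e.1 ∈ charts.take i ∨ charts[i] ∈ e.2.map Prod.fst)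

instance (charts : List String) (data : List (String × List (String × Int))) : Decidable (Pre_get_rank_data charts data) := by unfold Pre_get_rank_data; infer_instance

def pvWitness_get_rank_data : List String × (List (String × List (String × Int))) :=
  (["c1", "c2"],
   [("c1", [("c1", 5), ("c2", 3)]),
    ("c2", [("c1", 2), ("c2", 7)]),
    ("x",  [("c1", 5), ("c2", 1)])])

def Spec_get_rank_data (charts : List String) (data : List (String × List (String × Int))) (out : List (String × List (String × Int))) : Prop := out = get_rank_data_alt charts data
instance (charts : List String) (data : List (String × List (String × Int))) (out : List (String × List (String × Int))) : Decidable (Spec_get_rank_data charts data out) := by unfold Spec_get_rank_data; infer_instance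

-- ===== CLAIM (what is proved, stated in full; the proofs are below) =====
def Claim_equal_get_rank_data : Prop := ∀ (charts : List String) (data : List (String × List (String × Int))), Dom_get_rank_data charts data → Pre_get_rank_data charts data → Spec_get_rank_data charts data (get_rank_data charts data)

-- ===== LEMMAS AND PROOFS =====

-- B's primitives agree with A's
theorem bGet_eq (d : List (String × Int)) (k : String) : bGet d k = alGet d k := by
  induction d with
  | nil => rfl
  | cons p t ih =>
    cases p with
    | mk k' v' =>
      by_cases h : k' = k <;> simp [bGet, alGet, List.find?, h] at ih ⊢
      exact ih

theorem bPut_eq (d : List (String × Int)) (k : String) (v : Int) : bPut d k v = alSet d k v := by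
  induction d with
  | nil => rfl
  | cons p t ih =>
    cases p with
    | mk k' v' =>
      by_cases h : k' = k
      · simp [bPut, alSet, List.findIdx?_cons, h]
      · simp only [bPut, alSet, List.findIdx?_cons, decide_eq_true_eq, h, if_false] at ih ⊢
        cases ht : t.findIdx? (fun p => p.1 = k) with
        | none => rw [ht] at ih; simpa [ht] using congrArg (List.cons (k', v')) ih
        | some i => rw [ht] at ih; simpa [ht, List.set] using congrArg (List.cons (k', v')) ih

-- dSet is bWithChart of a single alSet
theorem dSet_eq_bWithChart (data : List (String × List (String × Int))) (c n : String) (v : Int) :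
    dSet data c n v = bWithChart data c (fun inn => alSet inn n v) := by
  induction data with
  | nil => rfl
  | cons e t ih =>
    cases e with
    | mk m d => by_cases h : m = c <;> simp [dSet, bWithChart, h, ih]

theorem bWithChart_id (data : List (String × List (String × Int))) (c : String) :
    bWithChart data c (fun inn => inn) = data := by
  induction data with
  | nil => rfl
  | cons e t ih =>
    cases e with
    | mk m d =>
      by_cases h : m = c
      · subst h; simp [bWithChart]
      · simp [bWithChart, h, ih]

theorem bWithChart_comp (data : List (String × List (String × Int))) (c : String)
    (f g : List (String × Int) → List (String × Int)) :
    bWithChart (bWithChart data c f) c g = bWithChart data c (fun inn => g (f inn)) := by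
  induction data with
  | nil => rfl
  | cons e t ih => by_cases h : e.1 = c <;> simp [bWithChart, h, ih]

-- a fold of per-item dict writes is one batched write into the chart's entry
theorem foldl_dSet_eq_bWithChart {β : Type} (l : List β) (nm : β → String) (v : β → Int)
    (data : List (String × List (String × Int))) (c : String) :
    l.foldl (fun d b => dSet d c (nm b) (v b)) data
      = bWithChart data c (fun inn => l.foldl (fun inn b => alSet inn (nm b) (v b)) inn) := by
  induction l generalizing data with
  | nil => exact (bWithChart_id data c).symm
  | cons b t ih =>
    rw [List.foldl_cons, ih, dSet_eq_bWithChart, bWithChart_comp]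
    rfl

-- zip with range(1, n+1) is enumerate with the components swapped and shifted
theorem zip_pyRange_eq_enumerate (xs : List String) (s : Int) :
    xs.zip (PySem.List.pyRange (s + 1) (s + 1 + xs.length) 1)
      = (PySem.List.enumerate xs s).map (fun q => (q.2, q.1 + 1)) := by
  induction xs generalizing s with
  | nil => rfl
  | cons x t ih =>
    have hb : s + 1 + ((x :: t).length : Int) = s + 1 + 1 + (t.length : Int) := by
      simp only [List.length_cons]; push_cast; omega
    rw [PySem.List.pyRange_one_cons (by simp only [List.length_cons]; push_cast; omega), List.zip_cons_cons,
        PySem.List.enumerate_cons, List.map_cons, hb, ih (s + 1)]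

-- "a outranks b": more scrobbles, or equal scrobbles with a smaller name
def Lb (a b : Int × String) : Bool :=
  decide (b.1 < a.1) || (decide (a.1 = b.1) && decide (a.2 < b.2))

theorem Lb_asymm (a b : Int × String) (h : Lb a b = true) : Lb b a = false := by
  simp only [Lb, Bool.or_eq_true, Bool.and_eq_true, decide_eq_true_eq] at h
  rcases h with h | ⟨h1, h2⟩
  · simp [Lb, lt_asymm h, LT.lt.ne h]
  · simp [Lb, h1, lt_asymm h2]

theorem Lb_irrefl (a : Int × String) : Lb a a = false := by simp [Lb]

theorem insertBy_L (x : Int × String) (acc : List (Int × String))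
    (hp : acc.Pairwise (fun a b => Lb a b = true))
    (ht : ∀ a ∈ acc, a.1 = x.1 → a.2 < x.2) :
    (PySem.List.insertBy (fun a b => decide (b.1 < a.1)) x acc).Pairwise (fun a b => Lb a b = true) := by
  induction acc with
  | nil => simp [PySem.List.insertBy]
  | cons y ys ih =>
    rw [PySem.List.insertBy]
    by_cases h : (y.1 < x.1)
    · rw [if_pos (by simpa using h)]
      constructor
      · intro z hz
        rcases List.mem_cons.mp hz with hz | hz
        · subst hz; simp [Lb, h]
        · have := (List.pairwise_cons.mp hp).1 z hz
          simp only [Lb, Bool.or_eq_true, Bool.and_eq_true, decide_eq_true_eq] at this ⊢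
          left; rcases this with h2 | ⟨h2, _⟩ <;> omega
      · exact hp
    · rw [if_neg (by simpa using h)]
      rw [List.pairwise_cons] at hp ⊢
      constructor
      · intro z hz
        rcases (PySem.List.mem_insertBy _ _ _ _).mp hz with hz | hz
        · subst hz
          simp only [Lb, Bool.or_eq_true, Bool.and_eq_true, decide_eq_true_eq]
          rcases lt_or_eq_of_le (not_lt.mp h) with h2 | h2
          · left; exact h2
          · right; exact ⟨h2.symm, ht y (by simp) h2.symm⟩
        · exact hp.1 z hz
      · exact ih hp.2 (fun a ha h1 => ht a (by simp [ha]) h1)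

-- STABILITY: after the stable name sort, the reverse scrobble sort is strictly "outranks"-sorted
theorem sortedRev_L (xs : List (Int × String))
    (h : xs.Pairwise (fun a b => a.2 < b.2)) :
    (PySem.List.sorted xs (fun x => x.1) true).Pairwise (fun a b => Lb a b = true) := by
  rw [PySem.List.sorted_rev_eq_foldl_insertBy]
  suffices H : ∀ (l : List (Int × String)) (acc : List (Int × String)),
      acc.Pairwise (fun a b => Lb a b = true) →
      (∀ a ∈ acc, ∀ z ∈ l, a.1 = z.1 → a.2 < z.2) →
      l.Pairwise (fun a b => a.2 < b.2) →
      (l.foldl (fun acc x => PySem.List.insertBy (fun a b => decide ((fun x => x.1) b < (fun x => x.1) a)) x acc) acc).Pairwise (fun a b => Lb a b = true) by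
    exact H xs [] (by simp) (by simp) h
  intro l
  induction l with
  | nil => intro acc h1 _ _; simpa using h1
  | cons x t ih =>
    intro acc h1 h2 h3
    rw [List.foldl_cons]
    rw [List.pairwise_cons] at h3
    apply ih
    · exact insertBy_L x acc h1 (fun a ha h' => h2 a ha x (by simp) h')
    · intro a ha z hz
      rcases (PySem.List.mem_insertBy _ _ _ _).mp ha with ha | ha
      · subst ha; exact fun _ => h3.1 z hz
      · exact fun he => h2 a ha z (by simp [hz]) he
    · exact h3.2

-- in a strictly "outranks"-sorted list, the dominator count of the i-th element is i
theorem idx_eq (r : List (Int × String)) (hL : r.Pairwise (fun a b => Lb a b = true))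
    (i : Nat) (hi : i < r.length) :
    r.countP (fun y => Lb y r[i]) = i := by
  induction r generalizing i with
  | nil => simp at hi
  | cons a t ih =>
    rw [List.pairwise_cons] at hL
    cases i with
    | zero =>
      simp only [List.getElem_cons_zero]
      rw [List.countP_cons, Lb_irrefl]
      simp only [Bool.false_eq_true, if_false, Nat.add_zero]
      rw [List.countP_eq_zero]
      intro y hy
      simp [Lb_asymm a y (hL.1 y hy)]
    | succ i =>
      simp only [List.getElem_cons_succ]
      have hi' : i < t.length := by simpa using hi
      rw [List.countP_cons, hL.1 t[i] (t.getElem_mem hi'), if_pos rfl, ih hL.2 i hi']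

-- a fold of list-index assignments never touching slot j leaves it unchanged
theorem foldl_set_not_hit {β : Type} (l : List β) (idx : β → Nat) (nm : β → String)
    (br0 : List String) (j : Nat) (h : ∀ b ∈ l, idx b ≠ j) :
    (l.foldl (fun br b => br.set (idx b) (nm b)) br0)[j]? = br0[j]? := by
  induction l generalizing br0 with
  | nil => rfl
  | cons b t ih =>
    rw [List.foldl_cons, ih _ (fun b' hb' => h b' (by simp [hb']))]
    exact List.getElem?_set_ne (h b (by simp))

theorem foldl_set_length {β : Type} (l : List β) (idx : β → Nat) (nm : β → String)
    (br0 : List String) :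
    (l.foldl (fun br b => br.set (idx b) (nm b)) br0).length = br0.length := by
  induction l generalizing br0 with
  | nil => rfl
  | cons b t ih => rw [List.foldl_cons, ih]; simp

-- slot j of the fold holds the name of the (unique up to name) element with index j
theorem foldl_set_unique {β : Type} (l : List β) (idx : β → Nat) (nm : β → String)
    (br0 : List String) (j : Nat) (hj : j < br0.length)
    (b0 : β) (hb0 : b0 ∈ l) (hidx : idx b0 = j)
    (huniq : ∀ b ∈ l, idx b = j → nm b = nm b0) :
    (l.foldl (fun br b => br.set (idx b) (nm b)) br0)[j]? = some (nm b0) := by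
  induction l generalizing br0 b0 with
  | nil => simp at hb0
  | cons b t ih =>
    rw [List.foldl_cons]
    by_cases hex : ∃ b' ∈ t, idx b' = j
    · obtain ⟨b', hb', hb'j⟩ := hex
      have hnm : nm b' = nm b0 := huniq b' (List.mem_cons_of_mem _ hb') hb'j
      rw [← hnm]
      exact ih (br0.set (idx b) (nm b)) (by simpa using hj) b' hb' hb'j
        (fun x hx hxj => (huniq x (List.mem_cons_of_mem _ hx) hxj).trans hnm.symm)
    · have hnot : ∀ b' ∈ t, idx b' ≠ j := fun b' hb' hh => hex ⟨b', hb', hh⟩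
      rw [foldl_set_not_hit t idx nm _ j hnot]
      have hb0b : b0 = b := by
        rcases List.mem_cons.mp hb0 with h1 | h1
        · exact h1
        · exact absurd hidx (hnot b0 h1)
      rw [← hb0b, hidx]
      exact List.getElem?_set_self hj

-- enumerate over a mapped list
theorem enumerate_map {α β : Type} (l : List α) (f : α → β) (n : Int) :
    PySem.List.enumerate (l.map f) n = (PySem.List.enumerate l n).map (fun p => (p.1, f p.2)) := by
  induction l generalizing n with
  | nil => rfl
  | cons a t ih =>
    rw [List.map_cons, PySem.List.enumerate_cons, PySem.List.enumerate_cons, List.map_cons, ih]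

-- bWithChart never changes the top-level keys
theorem bWithChart_fst (data : List (String × List (String × Int))) (c : String)
    (f : List (String × Int) → List (String × Int)) :
    (bWithChart data c f).map Prod.fst = data.map Prod.fst := by
  induction data with
  | nil => rfl
  | cons e t ih => by_cases h : e.1 = c <;> simp [bWithChart, h, ih]

-- THE ROUND LEMMA: A's sort-enumerate-write round equals B's count-place-batch-write round
theorem chartRound_eq (data : List (String × List (String × Int))) (c : String)
    (hnames : (data.map Prod.fst).Nodup) :
    (PySem.List.enumerate (PySem.List.sorted (PySem.List.sorted (data.map (fun p => (alGet p.2 c, p.1))) (fun x => x.2) false) (fun x => x.1) true) 0).foldl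
      (fun d ix => dSet d c ix.2.2 (ix.1 + 1)) data
    = (let items := data.map (fun p => (p.1, bGet p.2 c))
       let slots := items.foldl (fun sl it =>
          sl.set (items.countP (fun q => decide (q.2 > it.2) || (decide (q.2 = it.2) && decide (q.1 < it.1)))) it.1)
        (List.replicate items.length "")
       bWithChart data c (fun inner =>
        (slots.zip (PySem.List.pyRange 1 (PySem.List.len slots + 1) 1)).foldl
          (fun inn p => bPut inn p.1 p.2) inner)) := by
  simp only [funext fun d => funext fun k => bGet_eq d k, bPut_eq]
  set ranking := data.map (fun p => (alGet p.2 c, p.1)) with hrank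
  set xs1 := PySem.List.sorted ranking (fun x => x.2) false with hxs1
  set r := PySem.List.sorted xs1 (fun x => x.1) true with hr
  set items := data.map (fun p => (p.1, alGet p.2 c)) with hitems
  set cnt : String × Int → Nat := fun it => items.countP
      (fun q => decide (q.2 > it.2) || (decide (q.2 = it.2) && decide (q.1 < it.1))) with hcnt
  have hrk : ranking.map Prod.snd = data.map Prod.fst := by
    rw [hrank, List.map_map]; rfl
  have hperm : r.Perm ranking :=
    (PySem.List.sorted_perm xs1 (fun x => x.1) true).trans (PySem.List.sorted_perm ranking (fun x => x.2) false)
  have hx1 : xs1.Pairwise (fun a b => a.2 < b.2) := by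
    have hle : xs1.Pairwise (fun a b => a.2 ≤ b.2) := PySem.List.sorted_pairwise ranking (fun x => x.2)
    have hnd1 : (xs1.map Prod.snd).Nodup :=
      (((PySem.List.sorted_perm ranking (fun x => x.2) false).map Prod.snd).nodup_iff).mpr (hrk ▸ hnames)
    have hne : xs1.Pairwise (fun a b => a.2 ≠ b.2) := List.pairwise_map.mp hnd1
    exact (hle.and hne).imp (fun hab => lt_of_le_of_ne hab.1 hab.2)
  have hLr : r.Pairwise (fun a b => Lb a b = true) := sortedRev_L xs1 hx1
  have hlr : r.length = items.length := by
    rw [hr, PySem.List.length_sorted, hxs1, PySem.List.length_sorted, hrank, hitems,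
        List.length_map, List.length_map]
  have cnt0 : ∀ b ∈ items, cnt b = r.countP (fun y => Lb y (b.2, b.1)) := by
    intro b _
    rw [hcnt, hperm.countP_eq, hrank, hitems]
    simp only [List.countP_map]
    apply List.countP_congr
    intro p hp
    simp [Lb, Function.comp]
  have hpos : ∀ b ∈ items, ∀ (i : Nat) (hi : i < r.length), r[i] = (b.2, b.1) → cnt b = i := by
    intro b hb i hi hri
    rw [cnt0 b hb, ← hri]
    exact idx_eq r hLr i hi
  have hmem_items : ∀ b ∈ items, ((b.2, b.1) : Int × String) ∈ r := by
    intro b hb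
    apply hperm.mem_iff.mpr
    rw [hrank]
    obtain ⟨p, hp, hpb⟩ := List.mem_map.mp (hitems ▸ hb)
    exact List.mem_map.mpr ⟨p, hp, by rw [← hpb]⟩
  -- the counting-sort fills exactly the rank list of names
  have hbyrank : items.foldl (fun br it => br.set (cnt it) it.1) (List.replicate items.length "")
      = r.map Prod.snd := by
    apply List.ext_getElem?
    intro j
    by_cases hj : j < r.length
    · have hb0r : r[j] ∈ r := r.getElem_mem hj
      obtain ⟨p, hp, hpb⟩ := List.mem_map.mp (hrank ▸ hperm.mem_iff.mp hb0r)
      have hb0 : ((r[j].2, r[j].1) : String × Int) ∈ items := by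
        rw [hitems]
        refine List.mem_map.mpr ⟨p, hp, ?_⟩
        rw [← hpb]
      have hidx : cnt (r[j].2, r[j].1) = j := by
        apply hpos _ hb0 j hj
        rfl
      have huniq : ∀ b ∈ items, cnt b = j → b.1 = (r[j].2, r[j].1).1 := by
        intro b hb hbj
        obtain ⟨i, hi, hri⟩ := List.mem_iff_getElem.mp (hmem_items b hb)
        have : cnt b = i := hpos b hb i hi hri
        rw [this] at hbj
        subst hbj
        exact (congrArg Prod.snd hri).symm
      rw [foldl_set_unique items cnt (fun b => b.1) _ j (by rw [List.length_replicate]; omega)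
            (r[j].2, r[j].1) hb0 hidx huniq]
      rw [List.getElem?_map, List.getElem?_eq_getElem hj]
      rfl
    · have h1 : (items.foldl (fun br it => br.set (cnt it) it.1) (List.replicate items.length "")).length = items.length := by
        rw [foldl_set_length, List.length_replicate]
      rw [List.getElem?_eq_none (by rw [h1]; omega), List.getElem?_eq_none (by rw [List.length_map]; omega)]
  rw [foldl_dSet_eq_bWithChart (PySem.List.enumerate r 0) (fun ix => ix.2.2) (fun ix => ix.1 + 1) data c]
  rw [hbyrank]
  congr 1
  funext inner
  have hz : (r.map Prod.snd).zip (PySem.List.pyRange 1 (PySem.List.len (r.map Prod.snd) + 1) 1)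
      = (PySem.List.enumerate (r.map Prod.snd) 0).map (fun q => (q.2, q.1 + 1)) := by
    have := zip_pyRange_eq_enumerate (r.map Prod.snd) 0
    simpa [PySem.List.len_eq, Int.add_comm] using this
  rw [hz, enumerate_map, List.map_map, List.foldl_map]
  rfl

-- ===== VERDICT (by name: the statement is the Claim_ definition above) =====
theorem mainEq (charts : List String) (data : List (String × List (String × Int)))
    (hnames : (data.map Prod.fst).Nodup) :
    get_rank_data charts data = get_rank_data_alt charts data := by
  induction charts generalizing data with
  | nil => rfl
  | cons c cs ih =>
    rw [get_rank_data, List.foldl_cons, get_rank_data_alt]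
    by_cases hd : data = []
    · subst hd
      simp only [List.map_nil]
      rw [← get_rank_data, ← ih [] (by simp)]
      rfl
    · rw [if_neg (by simpa using hd)]
      rw [← get_rank_data]
      rw [show (data.map fun p => (alGet p.2 c, p.1)) = data.map (fun p => (alGet p.2 c, p.1)) from rfl]
      have hround := chartRound_eq data c hnames
      simp only at hround
      rw [hround]
      apply ih
      rw [bWithChart_fst]
      exact hnames

theorem get_rank_data_spec : Claim_equal_get_rank_data := by
  intro charts data _ hpre
  unfold Spec_get_rank_data
  exact mainEq charts data hpre.1
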